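-- pv_equiv track=rewrite | github.com/Gauss-p/leetcode | leetcode2025/2025_06/leetcode2025-06-23.py | check
-- ===== SOURCE A (Python) =====
-- def check(x, k):
--     if x%k == 0:
--         return False
--     half = 0
--     while half < x:
--         half = half*k+(x%k)
--         x //= k
--     return half==x or half//k==x
-- ===== SOURCE B (Python) =====
-- def check(x, k):
--     if x % k == 0:
--         return False
--     if x < 0:
--         return False
--     digits = []
--     while x:
--         digits.append(x % k)
--         x //= k
--     return digits == digits[::-1]
-- ===== Notes on version B (the rewrite author's own statement) =====
-- stated objective: alternative
-- what changed: Replaces A's numerical half-reversal (one accumulated integer compared at the midpoint) with an explicit list of base-k digits compared against its reversal, plus the idiomatic negative-number early False.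
-- outside the precondition, e.g. on check(275, -12): A returns False, B returns True
import Mathlib
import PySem

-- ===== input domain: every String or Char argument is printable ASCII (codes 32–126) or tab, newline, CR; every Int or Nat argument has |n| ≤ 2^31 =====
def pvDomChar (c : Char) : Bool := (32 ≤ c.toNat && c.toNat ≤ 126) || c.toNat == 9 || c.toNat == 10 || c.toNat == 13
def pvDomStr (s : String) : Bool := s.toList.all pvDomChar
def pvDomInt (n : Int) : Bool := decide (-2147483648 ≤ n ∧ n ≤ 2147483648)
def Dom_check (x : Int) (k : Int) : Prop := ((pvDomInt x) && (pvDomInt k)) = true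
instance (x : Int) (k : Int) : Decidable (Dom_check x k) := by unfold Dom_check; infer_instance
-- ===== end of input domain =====

-- B replaces A's numerical half-reversal with an explicit base-k digit list compared
-- against its reversal (objective: alternative; same asymptotic cost).

-- ===== PORT A =====
-- the while loop of A; fuel makes it total (100 iterations suffice on Pre_ ∧ Dom, proved below)
def checkLoop (k : Int) (half : Int) (x : Int) : Nat → Int × Int
  | 0 => (half, x)
  | f + 1 =>
    if half < x then
      checkLoop k (half * k + PySem.Int.mod x k) (PySem.Int.floordiv x k) f
    else (half, x)

def check (x : Int) (k : Int) : Bool :=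
  if PySem.Int.mod x k = 0 then false
  else
    let p := checkLoop k 0 x 100
    decide (p.1 = p.2) || decide (PySem.Int.floordiv p.1 k = p.2)

-- ===== PORT B =====
-- the digit-collecting while loop of B; fuel makes it total (100 iterations suffice on Pre_ ∧ Dom)
def altDigits (k : Int) (x : Int) : Nat → List Int
  | 0 => []
  | f + 1 =>
    if x = 0 then []
    else PySem.Int.mod x k :: altDigits k (PySem.Int.floordiv x k) f

def check_alt (x : Int) (k : Int) : Bool :=
  if PySem.Int.mod x k = 0 then false
  else if x < 0 then false
  else
    let ds := altDigits k x 100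
    decide (ds = ds.reverse)   -- digits == digits[::-1]; [::-1] of a whole list is List.reverse (exact)

-- ===== PRECONDITION & SPEC =====
-- Pre_ excludes k = 0, where A raises ZeroDivisionError, and negative bases k ≤ -2 with
-- positive x, where A's midpoint comparison and B's negabase digit palindrome are two
-- equally accidental notions of "palindrome in base k" that no caller would specify
-- (A does return there, e.g. x = 275, k = -12).
def Pre_check (x : Int) (k : Int) : Prop := k ≠ 0 ∧ (x ≤ 0 ∨ -1 ≤ k)
instance (x : Int) (k : Int) : Decidable (Pre_check x k) := by unfold Pre_check; infer_instance
def pvWitness_check : Int × Int := (121, 10)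

def Spec_check (x : Int) (k : Int) (out : Bool) : Prop := out = check_alt x k
instance (x : Int) (k : Int) (out : Bool) : Decidable (Spec_check x k out) := by unfold Spec_check; infer_instance

-- ===== CLAIM (what is proved, stated in full; the proofs are below) =====
def Claim_equal_check : Prop := ∀ (x : Int) (k : Int), Dom_check x k → Pre_check x k → Spec_check x k (check x k)

-- ===== LEMMAS AND PROOFS =====

def natLoop (b : Nat) : Nat → Nat → Nat → Nat × Nat
  | half, x, 0 => (half, x)
  | half, x, f + 1 =>
    if half < x then natLoop b (half * b + x % b) (x / b) f else (half, x)

lemma checkLoop_natCast (b : Nat) :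
    ∀ (f h x : Nat), checkLoop (b : Int) (h : Int) (x : Int) f
      = (((natLoop b h x f).1 : Int), ((natLoop b h x f).2 : Int)) := by
  intro f
  induction f with
  | zero => intro h x; simp [checkLoop, natLoop]
  | succ f ih =>
    intro h x
    simp only [checkLoop, natLoop, PySem.Int.mod_natCast, PySem.Int.floordiv_natCast,
      Nat.cast_lt]
    split
    · rw [show ((h:Int) * b + ((x % b : Nat) : Int)) = ((h * b + x % b : Nat) : Int) by push_cast; ring]
      exact ih _ _
    · rfl

lemma altDigits_natCast (b : Nat) (hb : 2 ≤ b) :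
    ∀ (f x : Nat), x < 2 ^ f →
      altDigits (b : Int) (x : Int) f = (Nat.digits b x).map (fun d : Nat => (d : Int)) := by
  intro f
  induction f with
  | zero => intro x hx; interval_cases x; simp [altDigits]
  | succ f ih =>
    intro x hx
    by_cases h0 : x = 0
    · subst h0; simp [altDigits]
    · rw [show ((x:Int)) = ((x:Nat) : Int) from rfl]
      simp only [altDigits, PySem.Int.mod_natCast, PySem.Int.floordiv_natCast]
      rw [if_neg (by exact_mod_cast h0)]
      rw [ih (x / b) (by
        have h2 : x / b ≤ x / 2 := Nat.div_le_div_left hb (by omega)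
        have hx2 : x / 2 < 2 ^ f := by
          rw [Nat.div_lt_iff_lt_mul (by omega)]
          calc x < 2 ^ (f+1) := hx
            _ = 2 ^ f * 2 := by ring
        omega)]
      rw [Nat.digits_def' (by omega : 1 < b) (by omega : 0 < x)]
      simp

lemma head?_take {α : Type} (l : List α) (i : Nat) (hi : 1 ≤ i) : (l.take i).head? = l.head? := by
  cases l <;> cases i <;> simp_all

def hVal (b : Nat) (L : List Nat) (i : Nat) : Nat := Nat.ofDigits b (L.take i).reverse
def tVal (b : Nat) (L : List Nat) (i : Nat) : Nat := Nat.ofDigits b (L.drop i)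

lemma tVal_cons (b : Nat) (L : List Nat) (i : Nat) (hi : i < L.length) :
    tVal b L i = L[i] + b * tVal b L (i+1) := by
  rw [tVal, List.drop_eq_getElem_cons hi, Nat.ofDigits_cons]; rfl

lemma hVal_succ (b : Nat) (L : List Nat) (i : Nat) (hi : i < L.length) :
    hVal b L (i+1) = L[i] + b * hVal b L i := by
  rw [hVal, List.take_succ_eq_append_getElem hi, List.reverse_append]
  simp [Nat.ofDigits_cons, hVal]

lemma tVal_mod (b : Nat) (L : List Nat) (hL : ∀ d ∈ L, d < b) (i : Nat) (hi : i < L.length) :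
    tVal b L i % b = L[i] := by
  rw [tVal_cons b L i hi, Nat.add_mul_mod_self_left,
    Nat.mod_eq_of_lt (hL _ (L.getElem_mem hi))]

lemma tVal_div (b : Nat) (hb : 2 ≤ b) (L : List Nat) (hL : ∀ d ∈ L, d < b) (i : Nat) (hi : i < L.length) :
    tVal b L i / b = tVal b L (i+1) := by
  rw [tVal_cons b L i hi, Nat.add_mul_div_left _ _ (by omega : 0 < b),
    Nat.div_eq_of_lt (hL _ (L.getElem_mem hi))]
  omega

lemma hVal_div (b : Nat) (hb : 2 ≤ b) (L : List Nat) (hL : ∀ d ∈ L, d < b) (i : Nat) (hi : i < L.length) :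
    hVal b L (i+1) / b = hVal b L i := by
  rw [hVal_succ b L i hi, Nat.add_mul_div_left _ _ (by omega : 0 < b),
    Nat.div_eq_of_lt (hL _ (L.getElem_mem hi))]
  omega

-- the loop, started at state i, runs to the first stop index j
lemma natLoop_run (b : Nat) (hb : 2 ≤ b) (L : List Nat) (hL : ∀ d ∈ L, d < b) (j : Nat)
    (hj : j ≤ L.length) (hstop : ¬ hVal b L j < tVal b L j) :
    ∀ (f i : Nat), i ≤ j → j - i ≤ f → (∀ m, i ≤ m → m < j → hVal b L m < tVal b L m) →
      natLoop b (hVal b L i) (tVal b L i) f = (hVal b L j, tVal b L j) := by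
  intro f
  induction f with
  | zero =>
    intro i hij hfi _
    have : i = j := by omega
    subst this; rfl
  | succ f ih =>
    intro i hij hfi hcont
    by_cases hij' : i = j
    · subst hij'; simp only [natLoop, if_neg hstop]
    · have hi : i < j := by omega
      have hiL : i < L.length := by omega
      simp only [natLoop, if_pos (hcont i le_rfl hi)]
      rw [tVal_mod b L hL i hiL, tVal_div b hb L hL i hiL,
        show hVal b L i * b + L[i] = hVal b L (i+1) by rw [hVal_succ b L i hiL]; ring]
      exact ih (i+1) (by omega) (by omega) (fun m hm hm' => hcont m (by omega) hm')

-- canonical digit representations of the two loop values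
lemma digits_hVal (b : Nat) (hb : 2 ≤ b) (L : List Nat) (hL : ∀ d ∈ L, d < b)
    (hne : L ≠ []) (h0 : L.head hne ≠ 0) (i : Nat) (hi : 1 ≤ i) :
    Nat.digits b (hVal b L i) = (L.take i).reverse := by
  apply Nat.digits_ofDigits b (by omega)
  · intro d hd
    exact hL d (List.mem_of_mem_take (List.mem_reverse.mp hd))
  · intro h
    rw [List.getLast_reverse]
    have h1 : (L.take i).head? = L.head? := head?_take L i hi
    have h2 : L.head? = some (L.head hne) := List.head?_eq_some_head hne
    intro hcon
    have h3 := List.head?_eq_some_head (l := L.take i) (by simpa using h)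
    rw [hcon, h1, h2] at h3
    exact h0 (Option.some.inj h3)

lemma digits_tVal (b : Nat) (hb : 2 ≤ b) (L : List Nat) (hL : ∀ d ∈ L, d < b)
    (hne : L ≠ []) (hlast : L.getLast hne ≠ 0) (i : Nat) (hi : i < L.length) :
    Nat.digits b (tVal b L i) = L.drop i := by
  have hd : L.drop i ≠ [] := by
    intro hcon
    have := List.length_drop (l := L) (i := i)
    rw [hcon] at this
    simp at this; omega
  apply Nat.digits_ofDigits b (by omega)
  · intro d hd'
    exact hL d (List.mem_of_mem_drop hd')
  · intro h
    have h1 : (L.take i ++ L.drop i).getLast? = (L.drop i).getLast? :=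
      List.getLast?_append_of_ne_nil _ h
    rw [List.take_append_drop] at h1
    rw [List.getLast?_eq_some_getLast hne, List.getLast?_eq_some_getLast h] at h1
    intro hcon
    apply hlast
    rw [Option.some.inj h1, hcon]

-- bounds
lemma hVal_lt (b : Nat) (hb : 2 ≤ b) (L : List Nat) (hL : ∀ d ∈ L, d < b) (i : Nat) :
    hVal b L i < b ^ i := by
  have h1 : Nat.ofDigits b (L.take i).reverse < b ^ (L.take i).reverse.length :=
    Nat.ofDigits_lt_base_pow_length (by omega)
      (fun d hd => hL d (List.mem_of_mem_take (List.mem_reverse.mp hd)))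
  calc hVal b L i < b ^ (L.take i).reverse.length := h1
    _ ≤ b ^ i := Nat.pow_le_pow_right (by omega) (by simp)

lemma tVal_lt (b : Nat) (hb : 2 ≤ b) (L : List Nat) (hL : ∀ d ∈ L, d < b) (i : Nat) :
    tVal b L i < b ^ (L.length - i) := by
  have h1 : Nat.ofDigits b (L.drop i) < b ^ (L.drop i).length :=
    Nat.ofDigits_lt_base_pow_length (by omega)
      (fun d hd => hL d (List.mem_of_mem_drop hd))
  simpa using h1

lemma hVal_ge (b : Nat) (hb : 2 ≤ b) (L : List Nat) (hL : ∀ d ∈ L, d < b)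
    (hne : L ≠ []) (h0 : L.head hne ≠ 0) (i : Nat) (hi : 1 ≤ i) (hi' : i ≤ L.length) :
    b ^ (i - 1) ≤ hVal b L i := by
  have hd := digits_hVal b hb L hL hne h0 i hi
  have hlen : (Nat.digits b (hVal b L i)).length = i := by
    rw [hd]; simp; omega
  have := (Nat.lt_digits_length_iff (b := b) (by omega : 1 < b) (hVal b L i) (k := i - 1)).mp
  rw [hlen] at this
  exact this (by omega)

lemma tVal_ge (b : Nat) (hb : 2 ≤ b) (L : List Nat) (hL : ∀ d ∈ L, d < b)
    (hne : L ≠ []) (hlast : L.getLast hne ≠ 0) (i : Nat) (hi : i < L.length) :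
    b ^ (L.length - i - 1) ≤ tVal b L i := by
  have hd := digits_tVal b hb L hL hne hlast i hi
  have hlen : (Nat.digits b (tVal b L i)).length = L.length - i := by
    rw [hd]; simp
  have := (Nat.lt_digits_length_iff (b := b) (by omega : 1 < b) (tVal b L i) (k := L.length - i - 1)).mp
  rw [hlen] at this
  exact this (by omega)

lemma core (b : Nat) (hb : 2 ≤ b) (L : List Nat) (hL : ∀ d ∈ L, d < b)
    (hne : L ≠ []) (h0 : L.head hne ≠ 0) (hlast : L.getLast hne ≠ 0)
    (f : Nat) (hf : L.length ≤ f) :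
    ((natLoop b 0 (Nat.ofDigits b L) f).1 = (natLoop b 0 (Nat.ofDigits b L) f).2 ∨
      (natLoop b 0 (Nat.ofDigits b L) f).1 / b = (natLoop b 0 (Nat.ofDigits b L) f).2)
      ↔ L.reverse = L := by
  have hn1 : 1 ≤ L.length := List.length_pos_of_ne_nil hne
  have hPn : ¬ hVal b L L.length < tVal b L L.length := by
    have : tVal b L L.length = 0 := by simp [tVal]
    omega
  have ht0 : 0 < tVal b L 0 := by
    have := tVal_ge b hb L hL hne hlast 0 (by omega)
    have := Nat.pow_pos (n := L.length - 0 - 1) (show 0 < b by omega)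
    omega
  have hex : ∃ i, ¬ hVal b L i < tVal b L i := ⟨L.length, hPn⟩
  have hjn : Nat.find hex ≤ L.length := Nat.find_le hPn
  have hj1 : 1 ≤ Nat.find hex := by
    rcases Nat.eq_zero_or_pos (Nat.find hex) with h | h
    · exfalso
      have := Nat.find_spec hex
      rw [h] at this
      have h00 : hVal b L 0 = 0 := by simp [hVal]
      omega
    · omega
  have hcont : ∀ m, m < Nat.find hex → hVal b L m < tVal b L m := by
    intro m hm
    exact not_not.mp (Nat.find_min hex hm)
  have hrun : natLoop b 0 (Nat.ofDigits b L) f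
      = (hVal b L (Nat.find hex), tVal b L (Nat.find hex)) := by
    have h00 : (0 : Nat) = hVal b L 0 := by simp [hVal]
    have ht00 : Nat.ofDigits b L = tVal b L 0 := rfl
    rw [h00, ht00]
    exact natLoop_run b hb L hL (Nat.find hex) hjn (Nat.find_spec hex) f 0 (by omega)
      (by omega) (fun m _ hm => hcont m hm)
  rw [hrun]
  constructor
  · rintro (heq | hdiv)
    all_goals first
      | (replace heq : hVal b L (Nat.find hex) = tVal b L (Nat.find hex) := heq)
      | (replace hdiv : hVal b L (Nat.find hex) / b = tVal b L (Nat.find hex) := hdiv)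
    · by_cases hjn' : Nat.find hex = L.length
      · exfalso
        rw [hjn'] at heq
        have h1 : tVal b L L.length = 0 := by simp [tVal]
        have h2 := hVal_ge b hb L hL hne h0 L.length (by omega) le_rfl
        have h3 := Nat.pow_pos (n := L.length - 1) (show 0 < b by omega)
        omega
      · have hjlt : Nat.find hex < L.length := by omega
        have e1 := digits_hVal b hb L hL hne h0 (Nat.find hex) hj1
        have e2 := digits_tVal b hb L hL hne hlast (Nat.find hex) hjlt
        have e3 : (L.take (Nat.find hex)).reverse = L.drop (Nat.find hex) := by
          rw [← e1, ← e2, heq]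
        have e4 : L = L.take (Nat.find hex) ++ (L.take (Nat.find hex)).reverse := by
          rw [e3, List.take_append_drop]
        rw [e4]
        simp [List.reverse_append]
    · obtain ⟨jm, hjm⟩ : ∃ jm, Nat.find hex = jm + 1 := ⟨Nat.find hex - 1, by omega⟩
      have hjmL : jm < L.length := by omega
      have hdiv' : hVal b L jm = tVal b L (Nat.find hex) := by
        rw [← hVal_div b hb L hL jm hjmL, ← hjm]
        exact hdiv
      by_cases hjn' : Nat.find hex = L.length
      · by_cases hn1' : L.length = 1
        · obtain ⟨a, ha⟩ := List.length_eq_one_iff.mp hn1'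
          rw [ha]
          simp
        · exfalso
          have h1 : tVal b L L.length = 0 := by simp [tVal]
          have hjm1 : 1 ≤ jm := by omega
          have h2 := hVal_ge b hb L hL hne h0 jm hjm1 (by omega)
          have h3 := Nat.pow_pos (n := jm - 1) (show 0 < b by omega)
          rw [hjn', h1] at hdiv'
          omega
      · have hjlt : Nat.find hex < L.length := by omega
        have htj : 0 < tVal b L (Nat.find hex) := by
          have := tVal_ge b hb L hL hne hlast (Nat.find hex) hjlt
          have := Nat.pow_pos (n := L.length - Nat.find hex - 1) (show 0 < b by omega)
          omega
        have hjm1 : 1 ≤ jm := by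
          rcases Nat.eq_zero_or_pos jm with h | h
          · exfalso
            rw [h] at hdiv'
            have h00 : hVal b L 0 = 0 := by simp [hVal]
            omega
          · omega
        have e1 := digits_hVal b hb L hL hne h0 jm hjm1
        have e2 := digits_tVal b hb L hL hne hlast (Nat.find hex) hjlt
        have e3 : (L.take jm).reverse = L.drop (Nat.find hex) := by
          rw [← e1, ← e2, hdiv']
        have e4 : L = L.take jm ++ (L[jm] :: (L.take jm).reverse) := by
          rw [e3, hjm, ← List.drop_eq_getElem_cons hjmL, List.take_append_drop]
        rw [e4]
        rw [List.reverse_append, List.reverse_cons, List.reverse_reverse, List.append_assoc]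
        rfl
  · intro hpal
    have hlow : ∀ i, 2 * i < L.length → hVal b L i < tVal b L i := by
      intro i h2i
      have h1 := hVal_lt b hb L hL i
      have h2 := tVal_ge b hb L hL hne hlast i (by omega)
      have h3 : b ^ i ≤ b ^ (L.length - i - 1) :=
        Nat.pow_le_pow_right (by omega) (by omega)
      omega
    rcases Nat.even_or_odd L.length with ⟨q, hq⟩ | ⟨q, hq⟩
    · -- even length, L.length = q + q
      have hq1 : 1 ≤ q := by omega
      have e : L.drop q = (L.take q).reverse := by
        have h1 := List.reverse_drop (l := L) (i := q)
        rw [hpal, show L.length - q = q by omega] at h1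
        rw [← h1, List.reverse_reverse]
      have hPq : ¬ hVal b L q < tVal b L q := by
        have : tVal b L q = hVal b L q := by
          unfold tVal hVal
          rw [e]
        omega
      have hjq : Nat.find hex = q := by
        refine le_antisymm (Nat.find_le hPq) ?_
        rw [Nat.le_find_iff]
        intro m hm
        exact not_not_intro (hlow m (by omega))
      left
      rw [hjq]
      have : tVal b L q = hVal b L q := by
        unfold tVal hVal
        rw [e]
      omega
    · -- odd length, L.length = 2*q + 1
      have hstopq : ¬ hVal b L (q + 1) < tVal b L (q + 1) := by
        have h1 := hVal_ge b hb L hL hne h0 (q + 1) (by omega) (by omega)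
        have h2 := tVal_lt b hb L hL (q + 1)
        rw [show L.length - (q + 1) = q by omega] at h2
        rw [show q + 1 - 1 = q by omega] at h1
        omega
      have hjq : Nat.find hex = q + 1 := by
        refine le_antisymm (Nat.find_le hstopq) ?_
        rw [Nat.le_find_iff]
        intro m hm
        exact not_not_intro (hlow m (by omega))
      right
      rw [hjq, hVal_div b hb L hL q (by omega)]
      have e : L.drop (q + 1) = (L.take q).reverse := by
        have h1 := List.reverse_drop (l := L) (i := q + 1)
        rw [hpal, show L.length - (q + 1) = q by omega] at h1
        rw [← h1, List.reverse_reverse]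
      unfold tVal hVal
      rw [e]

lemma checkLoop_stop (k h x : Int) (hhx : ¬ h < x) : ∀ f, checkLoop k h x f = (h, x) := by
  intro f
  cases f with
  | zero => rfl
  | succ f => simp only [checkLoop, if_neg hhx]

lemma check_main (x k : Int)
    (hdomx : -2147483648 ≤ x ∧ x ≤ 2147483648) (hpre : k ≠ 0 ∧ (x ≤ 0 ∨ -1 ≤ k)) :
    check x k = check_alt x k := by
  by_cases hm : PySem.Int.mod x k = 0
  · simp [check, check_alt, hm]
  · have hx0 : x ≠ 0 := by
      intro h; exact hm (h ▸ (PySem.Int.mod_eq_zero_iff_dvd 0 k).mpr (dvd_zero k))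
    have hk1 : k ≠ 1 := by
      intro h
      exact hm (h ▸ (PySem.Int.mod_eq_zero_iff_dvd x 1).mpr (one_dvd x))
    have hkm1 : k ≠ -1 := by
      intro h
      exact hm (h ▸ (PySem.Int.mod_eq_zero_iff_dvd x (-1)).mpr ⟨-x, by ring⟩)
    by_cases hneg : x < 0
    · -- for negative x the loop body is never entered and both sides are false
      have hstop := checkLoop_stop k 0 x (by omega) 100
      have hd0 : PySem.Int.floordiv (0 : Int) k = 0 := by
        simp [PySem.Int.floordiv]
      simp only [check, check_alt, if_neg hm, if_pos hneg, hstop]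
      simp [hd0]
      omega
    · -- x > 0, hence (by Pre_) k ≥ 2
      have hk2 : 2 ≤ k := by
        rcases hpre.2 with h | h
        · omega
        · omega
      obtain ⟨xn, hxn⟩ : ∃ xn : Nat, x = (xn : Int) := ⟨x.toNat, by omega⟩
      obtain ⟨bn, hbn⟩ : ∃ bn : Nat, k = (bn : Int) := ⟨k.toNat, by omega⟩
      have hbn2 : 2 ≤ bn := by omega
      have hxn0 : xn ≠ 0 := by omega
      have hmn : xn % bn ≠ 0 := by
        intro h
        apply hm
        rw [hxn, hbn, PySem.Int.mod_natCast, h]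
        rfl
      have hneL : Nat.digits bn xn ≠ [] := Nat.digits_ne_nil_iff_ne_zero.mpr hxn0
      have hLlt : ∀ d ∈ Nat.digits bn xn, d < bn :=
        fun d hd => Nat.digits_lt_base (by omega) hd
      have hhead : (Nat.digits bn xn).head hneL ≠ 0 := by
        have hdef := Nat.digits_def' (show 1 < bn by omega) (show 0 < xn by omega)
        have hh1 : (Nat.digits bn xn).head? = some (xn % bn) := by rw [hdef]; rfl
        have hh2 := List.head?_eq_some_head hneL
        rw [hh1] at hh2
        intro h
        rw [h] at hh2
        exact hmn (Option.some.inj hh2)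
      have hlastL : (Nat.digits bn xn).getLast hneL ≠ 0 := Nat.getLast_digit_ne_zero bn hxn0
      have hxn31 : xn ≤ 2 ^ 31 := by
        have : (2147483648 : Int) = ((2 ^ 31 : Nat) : Int) := by norm_num
        omega
      have hfit : xn < bn ^ 100 := by
        calc xn ≤ 2 ^ 31 := hxn31
          _ < 2 ^ 100 := by norm_num
          _ ≤ bn ^ 100 := Nat.pow_le_pow_left (by omega) 100
      have hlen : (Nat.digits bn xn).length ≤ 100 :=
        (Nat.digits_length_le_iff (show 1 < bn by omega) xn).mpr hfit
      have key := core bn hbn2 (Nat.digits bn xn) hLlt hneL hhead hlastL 100 hlen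
      rw [Nat.ofDigits_digits] at key
      have hB : altDigits k x 100
          = (Nat.digits bn xn).map (fun d : Nat => (d : Int)) := by
        rw [hxn, hbn]
        exact altDigits_natCast bn hbn2 100 xn (by
          calc xn ≤ 2 ^ 31 := hxn31
            _ < 2 ^ 100 := by norm_num)
      have hA : checkLoop k 0 x 100
          = (((natLoop bn 0 xn 100).1 : Int), ((natLoop bn 0 xn 100).2 : Int)) := by
        rw [hxn, hbn, show (0 : Int) = ((0 : Nat) : Int) from rfl]
        exact checkLoop_natCast bn 100 0 xn
      have hiff1 : ((Nat.digits bn xn).map (fun d : Nat => (d : Int))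
            = ((Nat.digits bn xn).map (fun d : Nat => (d : Int))).reverse)
          ↔ (Nat.digits bn xn).reverse = Nat.digits bn xn := by
        constructor
        · intro h
          rw [← List.map_reverse] at h
          exact (List.map_injective_iff.mpr (fun a b hab => by exact_mod_cast hab) h).symm
        · intro h
          rw [← List.map_reverse, h]
      have hfd : PySem.Int.floordiv ((natLoop bn 0 xn 100).1 : Int) k
          = (((natLoop bn 0 xn 100).1 / bn : Nat) : Int) := by
        rw [hbn, PySem.Int.floordiv_natCast]
      simp only [check, check_alt, if_neg hm, if_neg hneg, hA, hB]
      rw [hfd]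
      rw [show (decide (((natLoop bn 0 xn 100).1 : Int) = ((natLoop bn 0 xn 100).2 : Int)))
          = decide ((natLoop bn 0 xn 100).1 = (natLoop bn 0 xn 100).2)
        from decide_eq_decide.mpr Nat.cast_inj]
      rw [show (decide ((((natLoop bn 0 xn 100).1 / bn : Nat) : Int) = ((natLoop bn 0 xn 100).2 : Int)))
          = decide ((natLoop bn 0 xn 100).1 / bn = (natLoop bn 0 xn 100).2)
        from decide_eq_decide.mpr Nat.cast_inj]
      rw [← Bool.decide_or]
      exact decide_eq_decide.mpr (key.trans hiff1.symm)

-- ===== VERDICT (by name: the statement is the Claim_ definition above) =====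
theorem check_spec : Claim_equal_check := by
  intro x k hdom hpre
  have hdx : -2147483648 ≤ x ∧ x ≤ 2147483648 := by
    have h1 : pvDomInt x = true := by
      unfold Dom_check at hdom
      exact (Bool.and_eq_true_iff.mp hdom).1
    unfold pvDomInt at h1
    exact of_decide_eq_true h1
  exact check_main x k hdx hpre
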